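-- pv_equiv track=rewrite | github.com/hrishikesh-hiray/university-of-porto-ctf-xstf-dualcore | REV/Locked Temple/_brute.py | check
-- ===== SOURCE A (Python) =====
-- key = [0x71,0x22,0x90,0x11,0x63,0x74,0x81,0x52]
--
-- def rol8(v,n):
--     n%=8
--     return ((v<<n)|(v>>(8-n))) & 0xff
--
-- def check(inp):
--     esi=0x0b
--     rdx=1
--     ecx=0
--     eax=key[0]
--     eax ^= 0x55
--     while True:
--         ecx=inp[rdx-1]
--         if (eax & 3) != ecx:
--             return False
--         if rdx==8:
--             return True
--         eax=esi
--         eax ^= 0x55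
--         eax ^= key[rdx]
--         if ecx & 1:
--             eax = rol8(eax,4)
--         rdx += 1
--         esi += 0x0b
-- ===== SOURCE B (Python) =====
-- key = [0x71,0x22,0x90,0x11,0x63,0x74,0x81,0x52]
--
-- def check(inp):
--     # For each index r the register before masking is t = 11*r ^ 0x55 ^ key[r],
--     # optionally nibble-swapped; since only two bits survive the & 3 mask, the
--     # byte rotation collapses to picking either t & 3 or (t >> 4) & 3.
--     cand = [((11 * r ^ 0x55 ^ key[r]) & 3, (11 * r ^ 0x55 ^ key[r]) >> 4 & 3)
--             for r in range(8)]
--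
--     def go(i, prev_odd):
--         v = cand[i][1] if prev_odd else cand[i][0]
--         if inp[i] != v:
--             return False
--         if i == 7:
--             return True
--         return go(i + 1, v & 1 == 1)
--
--     return go(0, False)
-- ===== Notes on version B (the rewrite author's own statement) =====
-- stated objective: alternative
-- what changed: B discards A's register simulation (esi accumulator, byte-rotation helper, validate-while-generating while loop): a comprehension builds per index the two candidate 2-bit values from the closed form 11*r ^ 0x55 ^ key[r] (low nibble vs high nibble, since rol8 by 4 under the & 3 mask is just nibble selection), and a recursive walker compares the input while choosing the candidate by the previous byte's parity.
import Mathlib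
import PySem

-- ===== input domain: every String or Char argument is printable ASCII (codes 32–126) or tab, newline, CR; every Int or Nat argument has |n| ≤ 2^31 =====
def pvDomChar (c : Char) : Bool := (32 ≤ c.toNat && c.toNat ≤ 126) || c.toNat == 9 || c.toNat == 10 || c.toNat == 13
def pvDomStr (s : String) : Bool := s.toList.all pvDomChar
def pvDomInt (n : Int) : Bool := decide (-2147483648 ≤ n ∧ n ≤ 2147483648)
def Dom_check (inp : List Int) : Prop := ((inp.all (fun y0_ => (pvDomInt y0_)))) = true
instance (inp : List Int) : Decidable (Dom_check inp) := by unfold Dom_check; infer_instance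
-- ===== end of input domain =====

-- B replaces A's register simulation (esi accumulator, rol8 helper, validate-while-generating
-- while loop) by a candidate table built from the closed form 11*r ^ 0x55 ^ key[r] (low vs high
-- nibble, 2 bits each) plus a recursive comparison selecting by the previous byte's parity.
-- Where Python A raises IndexError (input shorter than 8 that is a correct prefix), B raises too;
-- Pre_check excludes exactly those inputs.

-- ===== PORT A =====
def key : List Nat := [0x71,0x22,0x90,0x11,0x63,0x74,0x81,0x52]
def rol8 (v n : Nat) : Nat :=
  let n := n % 8
  ((v <<< n) ||| (v >>> (8 - n))) &&& 0xff
def checkLoop (inp : List Int) : Nat → Nat → Nat → Nat → Bool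
  | 0, _, _, _ => false
  | fuel + 1, esi, rdx, eax =>
    match PySem.List.pyGet? inp ((rdx : Int) - 1) with
    | none => false
    | some ecx =>
      if ((eax &&& 3 : Nat) : Int) ≠ ecx then false
      else if rdx = 8 then true
      else
        let eax1 := (esi ^^^ 0x55) ^^^ key.getD rdx 0
        let eax2 := if PySem.Int.band ecx 1 ≠ 0 then rol8 eax1 4 else eax1
        checkLoop inp fuel (esi + 0x0b) (rdx + 1) eax2
def check (inp : List Int) : Bool :=
  checkLoop inp 8 0x0b 1 (key.getD 0 0 ^^^ 0x55)

-- ===== PORT B =====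
-- Source B's candidate table: for each index the two possible 2-bit values (low/high nibble)
def cand : List (Nat × Nat) :=
  (List.range 8).map (fun r =>
    ((((11 * r) ^^^ 0x55) ^^^ key.getD r 0) &&& 3,
     ((((11 * r) ^^^ 0x55) ^^^ key.getD r 0) >>> 4) &&& 3))
-- Source B's recursive walker `go` (fuel = remaining indices, bounded by 8)
def goLoop (inp : List Int) : Nat → Nat → Bool → Bool
  | 0, _, _ => false
  | fuel + 1, i, prevOdd =>
    let v := if prevOdd then (cand.getD i (0, 0)).2 else (cand.getD i (0, 0)).1
    match PySem.List.pyGet? inp (i : Int) with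
    | none => false
    | some x =>
      if x ≠ (v : Int) then false
      else if i = 7 then true
      else goLoop inp fuel (i + 1) (v &&& 1 == 1)
def check_alt (inp : List Int) : Bool :=
  goLoop inp 8 0 false

-- ===== PRECONDITION & SPEC =====
-- Pre_check excludes exactly the inputs on which Python A raises IndexError: inputs shorter
-- than 8 that are a correct prefix of the expected sequence (Python B raises there too).
def Pre_check (inp : List Int) : Prop :=
  8 ≤ inp.length ∨ inp ≠ ([0,0,3,2,2,2,2,2] : List Int).take inp.length

instance (inp : List Int) : Decidable (Pre_check inp) := by unfold Pre_check; infer_instance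

def pvWitness_check : List Int := [0, 0, 3, 2, 2, 2, 2, 2]

def Spec_check (inp : List Int) (out : Bool) : Prop := out = check_alt inp
instance (inp : List Int) (out : Bool) : Decidable (Spec_check inp out) := by unfold Spec_check; infer_instance

-- ===== CLAIM (what is proved, stated in full; the proofs are below) =====
def Claim_equal_check : Prop := ∀ (inp : List Int), Dom_check inp → Pre_check inp → Spec_check inp (check inp)

-- ===== LEMMAS AND PROOFS =====
theorem cand_eq : cand = [(0,2),(0,3),(3,1),(1,2),(2,1),(2,1),(2,1),(2,0)] := by decide

theorem step7 (inp : List Int) :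
    checkLoop inp 1 88 8 74 = goLoop inp 1 7 false := by
  rw [checkLoop, goLoop]
  norm_num [cand_eq]
  cases hv : PySem.List.pyGet? inp (7 : Int) with
  | none => rfl
  | some v =>
    by_cases h : v = 2
    · subst h; simp
    · simp [h, eq_comm]

theorem step6 (inp : List Int) :
    checkLoop inp 2 77 7 150 = goLoop inp 2 6 false := by
  rw [checkLoop, goLoop]
  norm_num [cand_eq]
  cases hv : PySem.List.pyGet? inp (6 : Int) with
  | none => rfl
  | some v =>
    by_cases h : v = 2
    · subst h
      norm_num [PySem.Int.band, rol8, key]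
      simp [step7]
    · simp [h, eq_comm]

theorem step5 (inp : List Int) :
    checkLoop inp 3 66 6 22 = goLoop inp 3 5 false := by
  rw [checkLoop, goLoop]
  norm_num [cand_eq]
  cases hv : PySem.List.pyGet? inp (5 : Int) with
  | none => rfl
  | some v =>
    by_cases h : v = 2
    · subst h
      norm_num [PySem.Int.band, rol8, key]
      simp [step6]
    · simp [h, eq_comm]

theorem step4 (inp : List Int) :
    checkLoop inp 4 55 5 26 = goLoop inp 4 4 false := by
  rw [checkLoop, goLoop]
  norm_num [cand_eq]
  cases hv : PySem.List.pyGet? inp (4 : Int) with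
  | none => rfl
  | some v =>
    by_cases h : v = 2
    · subst h
      norm_num [PySem.Int.band, rol8, key]
      simp [step5]
    · simp [h, eq_comm]

theorem step3 (inp : List Int) :
    checkLoop inp 5 44 4 86 = goLoop inp 5 3 true := by
  rw [checkLoop, goLoop]
  norm_num [cand_eq]
  cases hv : PySem.List.pyGet? inp (3 : Int) with
  | none => rfl
  | some v =>
    by_cases h : v = 2
    · subst h
      norm_num [PySem.Int.band, rol8, key]
      simp [step4]
    · simp [h, eq_comm]

theorem step2 (inp : List Int) :
    checkLoop inp 6 33 3 211 = goLoop inp 6 2 false := by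
  rw [checkLoop, goLoop]
  norm_num [cand_eq]
  cases hv : PySem.List.pyGet? inp (2 : Int) with
  | none => rfl
  | some v =>
    by_cases h : v = 3
    · subst h
      norm_num [PySem.Int.band, rol8, key]
      simp [step3]
    · simp [h, eq_comm]

theorem step1 (inp : List Int) :
    checkLoop inp 7 22 2 124 = goLoop inp 7 1 false := by
  rw [checkLoop, goLoop]
  norm_num [cand_eq]
  cases hv : PySem.List.pyGet? inp (1 : Int) with
  | none => rfl
  | some v =>
    by_cases h : v = 0
    · subst h
      norm_num [PySem.Int.band, rol8, key]
      simp [step2]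
    · simp [h, eq_comm]

theorem step0 (inp : List Int) :
    checkLoop inp 8 11 1 36 = goLoop inp 8 0 false := by
  rw [checkLoop, goLoop]
  norm_num [cand_eq]
  cases hv : PySem.List.pyGet? inp (0 : Int) with
  | none => rfl
  | some v =>
    by_cases h : v = 0
    · subst h
      norm_num [PySem.Int.band, rol8, key]
      simp [step1]
    · simp [h, eq_comm]

theorem check_eq_alt (inp : List Int) : check inp = check_alt inp := by
  rw [check, check_alt]
  norm_num [key]
  simp [step0]

-- ===== VERDICT (by name: the statement is the Claim_ definition above) =====
theorem check_spec : Claim_equal_check := by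
  intro inp _ _
  exact check_eq_alt inp
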